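-- pv_equiv track=rewrite | github.com/syrupy-project/syrupy | src/syrupy/location.py | __valid_id
-- ===== SOURCE A (Python) =====
-- def __valid_id(name: str) -> str:
--     """
--     Take characters from the name while the result would be a valid python
--     identified. Example: "test_2[A]" returns "test_2" while "1_a" would return ""
--     """
--     valid_id = ""
--     for char in name:
--         new_valid_id = f"{valid_id}{char}"
--         if not new_valid_id.isidentifier():
--             break
--         valid_id = new_valid_id
--     return valid_id
-- ===== SOURCE B (Python) =====
-- def __valid_id(name: str) -> str:
--     # Single pass: first char must be id-start, later chars id-continue.
--     if not name or not (name[0].isalpha() or name[0] == "_"):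
--         return ""
--     n = 1
--     while n < len(name) and (name[n].isalnum() or name[n] == "_"):
--         n += 1
--     return name[:n]
-- ===== Notes on version B (the rewrite author's own statement) =====
-- stated objective: faster
-- what changed: A regrows the prefix and re-validates the whole string with isidentifier at every step (O(n^2)); B does one pass checking id-start on the first char and id-continue on each later char.
import Mathlib
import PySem

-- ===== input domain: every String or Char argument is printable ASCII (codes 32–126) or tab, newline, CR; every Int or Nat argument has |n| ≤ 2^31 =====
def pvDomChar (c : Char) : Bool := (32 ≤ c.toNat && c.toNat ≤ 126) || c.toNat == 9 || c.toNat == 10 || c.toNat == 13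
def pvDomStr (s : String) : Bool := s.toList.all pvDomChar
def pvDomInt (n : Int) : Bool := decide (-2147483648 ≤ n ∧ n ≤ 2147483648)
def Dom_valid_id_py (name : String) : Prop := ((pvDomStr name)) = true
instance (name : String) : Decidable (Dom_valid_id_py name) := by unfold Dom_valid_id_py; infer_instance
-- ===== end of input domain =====

-- B replaces A's quadratic grow-and-revalidate loop by a single pass (id-start check on the
-- first char, id-continue checks after); same return value on all ASCII inputs.

-- ===== PORT A =====
-- ASCII id-start / id-continue; exact for str.isidentifier on the ASCII domain
def pvIdStart (c : Char) : Bool := c.isAlpha || c == '_'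
def pvIdCont (c : Char) : Bool := c.isAlphanum || c == '_'
-- s.isidentifier for an ASCII string s (exact on Dom)
def pvIsIdent (s : List Char) : Bool :=
  match s with
  | [] => false
  | h :: t => pvIdStart h && t.all pvIdCont

-- the loop of A: accumulate, re-check the whole prefix, break on failure
def validIdLoopA (acc : List Char) : List Char → List Char
  | [] => acc
  | c :: rest =>
    let newAcc := acc ++ [c]
    if ¬ pvIsIdent newAcc then acc else validIdLoopA newAcc rest

def valid_id_py (name : String) : String :=
  String.mk (validIdLoopA [] name.toList)

-- ===== PORT B =====
def valid_id_py_alt (name : String) : String :=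
  match name.toList with
  | [] => ""
  | c :: rest =>
    if pvIdStart c then String.mk (c :: rest.takeWhile pvIdCont) else ""

-- ===== PRECONDITION & SPEC =====
def Spec_valid_id_py (name : String) (out : String) : Prop := out = valid_id_py_alt name
instance (name : String) (out : String) : Decidable (Spec_valid_id_py name out) := by unfold Spec_valid_id_py; infer_instance

-- ===== CLAIM (what is proved, stated in full; the proofs are below) =====
def Claim_equal_valid_id_py : Prop := ∀ (name : String), Dom_valid_id_py name → Spec_valid_id_py name (valid_id_py name)

-- ===== LEMMAS AND PROOFS =====

theorem validIdLoopA_cons (acc : List Char) (c : Char) (cs : List Char) :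
    validIdLoopA acc (c :: cs) =
      if ¬ pvIsIdent (acc ++ [c]) then acc else validIdLoopA (acc ++ [c]) cs := rfl

-- loop invariant: once a valid identifier prefix h :: t is accumulated, A's loop
-- simply appends the id-continue run of the remaining input
theorem validIdLoopA_inv (rest : List Char) :
    ∀ (h : Char) (t : List Char), pvIdStart h = true → t.all pvIdCont = true →
    validIdLoopA (h :: t) rest = (h :: t) ++ rest.takeWhile pvIdCont := by
  induction rest with
  | nil => intro h t _ _; simp [validIdLoopA]
  | cons c cs ih =>
    intro h t hs ht
    rw [validIdLoopA_cons]
    by_cases hc : pvIdCont c = true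
    · have hnew : pvIsIdent (h :: (t ++ [c])) = true := by
        simp [pvIsIdent, hs, List.all_append, ht, hc]
      rw [if_neg (by simp only [List.cons_append]; simp [hnew])]
      have := ih h (t ++ [c]) hs (by simp [List.all_append, ht, hc])
      simp only [List.cons_append] at this ⊢
      rw [this]
      simp [List.takeWhile, hc]
    · have hnew : pvIsIdent (h :: (t ++ [c])) = false := by
        simp [pvIsIdent, hs, List.all_append, ht]
        simpa using hc
      rw [if_pos (by simp only [List.cons_append]; simp [hnew])]
      simp [List.takeWhile, hc]

-- ===== VERDICT (by name: the statement is the Claim_ definition above) =====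
theorem valid_id_py_spec : Claim_equal_valid_id_py := by
  intro name _
  unfold Spec_valid_id_py valid_id_py valid_id_py_alt
  cases hl : name.toList with
  | nil => simp [validIdLoopA]; rfl
  | cons c rest =>
    rw [validIdLoopA_cons]
    by_cases hs : pvIdStart c = true
    · have hid : pvIsIdent [c] = true := by simp [pvIsIdent, hs]
      rw [if_neg (by simp only [List.nil_append]; simp [hid])]
      simp only [List.nil_append]
      rw [validIdLoopA_inv rest c [] hs (by simp)]
      simp [hs]
    · have hid : pvIsIdent [c] = false := by
        simp [pvIsIdent]; simpa using hs
      rw [if_pos (by simp only [List.nil_append]; simp [hid])]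
      simp [hs]
      rfl
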